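-- pv_equiv track=rewrite | github.com/DTW-Thalion/MPEG-O | python/tests/test_m86_genomic_codec_wiring.py | _mixed_cigars
-- ===== SOURCE A (Python) =====
-- def _mixed_cigars(n_reads: int) -> list[str]:
--     """Realistic mixed-CIGAR distribution — 80% perfect-match, 10% del, 10% soft-clip.
--
--     Per HANDOFF.md §6.4 fixture A spec.
--     """
--     out: list[str] = []
--     for i in range(n_reads):
--         m = i % 10
--         if m < 8:
--             out.append("100M")
--         elif m == 8:
--             out.append("99M1D")
--         else:
--             out.append("50M50S")
--     return out
-- ===== SOURCE B (Python) =====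
-- def _mixed_cigars(n_reads: int) -> list[str]:
--     """Same output as A, built by block replication of the period-10 pattern."""
--     pattern = ["100M"] * 8 + ["99M1D"] + ["50M50S"]
--     k = max(n_reads, 0)
--     return pattern * (k // 10) + pattern[: k % 10]
-- ===== Notes on version B (the rewrite author's own statement) =====
-- stated objective: simpler
-- what changed: Replaces the per-index loop with its three-way modulo branch by defining the period-10 pattern once and assembling the result via list replication plus a slice of the remainder.
import Mathlib
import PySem

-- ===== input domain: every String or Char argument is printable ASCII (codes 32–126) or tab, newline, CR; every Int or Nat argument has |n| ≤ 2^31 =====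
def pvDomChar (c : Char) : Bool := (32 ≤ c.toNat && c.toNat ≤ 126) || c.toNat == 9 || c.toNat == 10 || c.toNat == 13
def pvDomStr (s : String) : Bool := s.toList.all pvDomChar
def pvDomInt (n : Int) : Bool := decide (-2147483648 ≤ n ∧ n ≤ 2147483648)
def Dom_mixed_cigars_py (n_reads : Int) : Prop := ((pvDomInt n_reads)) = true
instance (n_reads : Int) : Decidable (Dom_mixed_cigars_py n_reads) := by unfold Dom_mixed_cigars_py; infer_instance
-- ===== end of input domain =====

-- B builds the same list by replicating the period-10 pattern and slicing the remainder,
-- instead of A's per-index loop with a three-way modulo branch (objective: simpler).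

-- ===== PORT A =====
def mixed_cigars_py (n_reads : Int) : List String :=
  (PySem.List.pyRange 0 n_reads 1).foldl
    (fun out i =>
      if PySem.Int.mod i 10 < 8 then out ++ ["100M"]
      else if PySem.Int.mod i 10 = 8 then out ++ ["99M1D"]
      else out ++ ["50M50S"]) []

-- ===== PORT B =====
def cigarPattern : List String := List.replicate 8 "100M" ++ ["99M1D"] ++ ["50M50S"]

def mixed_cigars_py_alt (n_reads : Int) : List String :=
  let k := max n_reads 0
  (List.replicate (PySem.Int.floordiv k 10).toNat cigarPattern).flatten ++
    PySem.List.slice cigarPattern none (some (PySem.Int.mod k 10))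

-- ===== PRECONDITION & SPEC =====
def Spec_mixed_cigars_py (n_reads : Int) (out : List String) : Prop := out = mixed_cigars_py_alt n_reads
instance (n_reads : Int) (out : List String) : Decidable (Spec_mixed_cigars_py n_reads out) := by unfold Spec_mixed_cigars_py; infer_instance

-- ===== CLAIM (what is proved, stated in full; the proofs are below) =====
def Claim_equal_mixed_cigars_py : Prop := ∀ (n_reads : Int), Dom_mixed_cigars_py n_reads → Spec_mixed_cigars_py n_reads (mixed_cigars_py n_reads)

-- ===== LEMMAS AND PROOFS =====

-- the element A's loop appends at index i, expressed on i % 10 (as a Nat)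
def patN (r : Nat) : String := if r < 8 then "100M" else if r = 8 then "99M1D" else "50M50S"

-- B's value at a nonnegative count, over Nat arithmetic
def Bnat (n : Nat) : List String :=
  (List.replicate (n / 10) cigarPattern).flatten ++ cigarPattern.take (n % 10)

lemma body_step (out : List String) (n : Nat) :
    (if PySem.Int.mod (n : Int) 10 < 8 then out ++ ["100M"]
     else if PySem.Int.mod (n : Int) 10 = 8 then out ++ ["99M1D"]
     else out ++ ["50M50S"]) = out ++ [patN (n % 10)] := by
  have hm : PySem.Int.mod (n : Int) 10 = ((n % 10 : Nat) : Int) := by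
    rw [PySem.Int.mod_eq_emod_of_pos (by norm_num)]; omega
  rw [hm]
  have h10 : n % 10 < 10 := Nat.mod_lt _ (by norm_num)
  set r := n % 10 with hr
  interval_cases r <;> norm_num [patN]

lemma A_succ (n : Nat) :
    mixed_cigars_py ((n : Int) + 1) = mixed_cigars_py (n : Int) ++ [patN (n % 10)] := by
  unfold mixed_cigars_py
  rw [PySem.List.pyRange_one_succ_right (by positivity), List.foldl_append]
  simp only [List.foldl_cons, List.foldl_nil]
  exact body_step _ n

lemma Bnat_succ (n : Nat) : Bnat (n + 1) = Bnat n ++ [patN (n % 10)] := by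
  rcases Nat.lt_or_ge (n % 10) 9 with h | h
  · have hd : (n + 1) / 10 = n / 10 := by omega
    have hm : (n + 1) % 10 = n % 10 + 1 := by omega
    rw [Bnat, Bnat, hd, hm, List.append_assoc]
    congr 1
    have h9 : n % 10 < 9 := h
    set r := n % 10 with hr
    interval_cases r <;> decide
  · have h9 : n % 10 = 9 := by omega
    have hd : (n + 1) / 10 = n / 10 + 1 := by omega
    have hm : (n + 1) % 10 = 0 := by omega
    rw [Bnat, Bnat, hd, hm, h9, List.replicate_succ', List.flatten_append]
    simp [cigarPattern, patN]

lemma key (n : Nat) : mixed_cigars_py (n : Int) = Bnat n := by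
  induction n with
  | zero => decide
  | succ n ih =>
      have hcast : ((n + 1 : Nat) : Int) = (n : Int) + 1 := by push_cast; ring
      rw [hcast, A_succ n, ih, Bnat_succ n]

lemma Balt_nat (m : Nat) : mixed_cigars_py_alt (m : Int) = Bnat m := by
  unfold mixed_cigars_py_alt Bnat
  have hmax : max (m : Int) 0 = (m : Int) := max_eq_left (by positivity)
  have hdiv : (PySem.Int.floordiv (m : Int) 10).toNat = m / 10 := by
    rw [PySem.Int.floordiv_eq_ediv_of_pos (by norm_num)]; omega
  have hmod : PySem.Int.mod (m : Int) 10 = ((m % 10 : Nat) : Int) := by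
    rw [PySem.Int.mod_eq_emod_of_pos (by norm_num)]; omega
  simp only [hmax, hdiv, hmod, PySem.List.slice_to_natCast]

lemma A_nonpos (n : Int) (h : n ≤ 0) : mixed_cigars_py n = [] := by
  unfold mixed_cigars_py
  rw [PySem.List.pyRange_one_eq_nil h]; rfl

lemma B_nonpos (n : Int) (h : n ≤ 0) : mixed_cigars_py_alt n = [] := by
  unfold mixed_cigars_py_alt
  rw [max_eq_right h]
  decide

-- ===== VERDICT (by name: the statement is the Claim_ definition above) =====
theorem mixed_cigars_py_spec : Claim_equal_mixed_cigars_py := by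
  intro n _
  unfold Spec_mixed_cigars_py
  by_cases h : n ≤ 0
  · rw [A_nonpos n h, B_nonpos n h]
  · obtain ⟨m, rfl⟩ : ∃ m : Nat, n = (m : Int) := ⟨n.toNat, (Int.toNat_of_nonneg (by omega)).symm⟩
    rw [key m, Balt_nat m]
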